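-- pv_equiv track=rewrite | github.com/Md-Abu-Omayer-Babu/Code-Reviewer-AI-2.0 | backend/services/comment_finder.py | find_comments
-- ===== SOURCE A (Python) =====
-- def find_comments(python_code: str) -> str:
--     comments = ""
--     i = 0
--
--     while i < len(python_code):
--         if python_code[i] == "#":
--             comment = ""
--             while i < len(python_code) and python_code[i] != "\n":
--                 comment += python_code[i]
--                 i += 1
--             comments += comment + "\n"
--         else:
--             i += 1
--
--     if comments == "":
--         return "No comments found"
--     return comments
-- ===== SOURCE B (Python) =====
-- def find_comments(python_code: str) -> str:
--     chunks = []
--     for line in python_code.split('\n'):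
--         pos = line.find('#')
--         if pos != -1:
--             chunks.append(line[pos:] + '\n')
--     return ''.join(chunks) or "No comments found"
-- ===== Notes on version B (the rewrite author's own statement) =====
-- stated objective: faster
-- what changed: Replaced the char-by-char nested while loops with quadratic string concatenation by a line-based pass: split on newline, take the slice from the first hash of each line, join once.
import Mathlib
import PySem

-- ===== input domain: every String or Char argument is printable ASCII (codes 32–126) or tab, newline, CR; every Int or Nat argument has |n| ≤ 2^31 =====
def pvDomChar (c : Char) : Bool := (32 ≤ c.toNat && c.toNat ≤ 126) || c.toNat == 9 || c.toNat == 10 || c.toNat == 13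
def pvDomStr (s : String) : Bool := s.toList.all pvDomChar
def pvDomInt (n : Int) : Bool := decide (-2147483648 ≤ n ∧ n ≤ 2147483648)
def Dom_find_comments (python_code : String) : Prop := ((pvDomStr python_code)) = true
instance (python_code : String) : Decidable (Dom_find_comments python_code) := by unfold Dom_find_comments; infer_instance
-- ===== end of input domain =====

-- B replaces A's char-by-char nested while loops with a line-based pass (split on '\n',
-- take the slice from the first hash of each line, join once); objective: faster (timed by the check).

-- ===== PORT A =====
-- inner while loop of A: collect chars until '\n' (or end), return (comment, rest)
def findCommentsInner : List Char → List Char × List Char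
  | [] => ([], [])
  | c :: cs =>
    if c = '\n' then ([], c :: cs)
    else
      let r := findCommentsInner cs
      (c :: r.1, r.2)

theorem findCommentsInner_snd_length : ∀ cs : List Char, (findCommentsInner cs).2.length ≤ cs.length
  | [] => Nat.le_refl _
  | c :: cs => by
    simp only [findCommentsInner]
    split
    · simp
    · exact Nat.le_trans (findCommentsInner_snd_length cs) (Nat.le_succ _)

-- outer while loop of A: scan for '#', collect the comment, append '\n', continue
def findCommentsOuter : List Char → List Char
  | [] => []
  | c :: cs =>
    if c = '#' then
      let r := findCommentsInner cs
      (c :: r.1) ++ ['\n'] ++ findCommentsOuter r.2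
    else findCommentsOuter cs
termination_by cs => cs.length
decreasing_by
  · exact Nat.lt_succ_of_le (findCommentsInner_snd_length cs)
  · simp

def find_comments (python_code : String) : String :=
  let comments := findCommentsOuter python_code.toList
  if comments = [] then "No comments found" else String.ofList comments

-- ===== PORT B =====
def find_comments_alt (python_code : String) : String :=
  let lines := python_code.toList.splitOn '\n'
  let chunks := lines.foldl (fun acc line =>
      let pos := PySem.Chars.find line ['#']
      if pos ≠ -1 then acc ++ [PySem.Chars.slice line (some pos) none ++ ['\n']] else acc) []
  let res := PySem.Chars.join [] chunks
  if res = [] then "No comments found" else String.ofList res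

-- ===== PRECONDITION & SPEC =====
def Spec_find_comments (python_code : String) (out : String) : Prop := out = find_comments_alt python_code
instance (python_code : String) (out : String) : Decidable (Spec_find_comments python_code out) := by unfold Spec_find_comments; infer_instance

-- ===== CLAIM (what is proved, stated in full; the proofs are below) =====
def Claim_equal_find_comments : Prop := ∀ (python_code : String), Dom_find_comments python_code → Spec_find_comments python_code (find_comments python_code)

-- ===== LEMMAS AND PROOFS =====

-- per-line result B computes, in takeWhile/dropWhile form
def pvLine (line : List Char) : List Char :=
  if '#' ∈ line then line.dropWhile (· ≠ '#') ++ ['\n'] else []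

theorem pv_inner_spec (cs : List Char) :
    findCommentsInner cs = (cs.takeWhile (· ≠ '\n'), cs.dropWhile (· ≠ '\n')) := by
  induction cs with
  | nil => rfl
  | cons c t ih =>
    by_cases h : c = '\n' <;>
      simp [findCommentsInner, h, ih]

theorem pv_drop_takeWhile_length (p : Char → Bool) (l : List Char) :
    l.drop (l.takeWhile p).length = l.dropWhile p := by
  induction l with
  | nil => rfl
  | cons c t ih => by_cases h : p c <;> simp [h, ih]

theorem pv_head_dropWhile (p : Char → Bool) :
    ∀ (t : List Char) (d : Char) (u : List Char), t.dropWhile p = d :: u → p d = false := by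
  intro t
  induction t with
  | nil => intro d u h; simp at h
  | cons c t ih =>
    intro d u h
    by_cases hc : p c
    · exact ih d u (by simpa [hc] using h)
    · simp [hc] at h
      simp [← h.1, hc]

theorem pv_takeWhile_getElem? (p : Char → Bool) :
    ∀ (l : List Char) (i : Nat), i < (l.takeWhile p).length → ∃ c, l[i]? = some c ∧ p c = true := by
  intro l
  induction l with
  | nil => intro i h; simp at h
  | cons c t ih =>
    intro i h
    by_cases hc : p c
    · cases i with
      | zero => exact ⟨c, by simp, hc⟩
      | succ j =>
        simp [hc] at h
        obtain ⟨d, hd, hp⟩ := ih j (by omega)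
        exact ⟨d, by simpa using hd, hp⟩
    · simp [hc] at h

theorem pv_singleton_prefix (a : Char) (l : List Char) : [a] <+: l ↔ l.head? = some a := by
  cases l with
  | nil => simp
  | cons c t => simp [List.cons_prefix_cons, eq_comm]

theorem pv_find_singleton (a : Char) (s : List Char) :
    PySem.Chars.find s [a] = if a ∈ s then ((s.takeWhile (· ≠ a)).length : Int) else -1 := by
  by_cases hm : a ∈ s
  · have hinf : [a] <:+: s := (List.singleton_infix_iff a s).mpr hm
    have h0 : (0 : Int) ≤ PySem.Chars.find s [a] := (PySem.Chars.find_nonneg_iff s [a]).mpr hinf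
    obtain ⟨hp, hmin⟩ := PySem.Chars.find_spec h0
    have key : ∀ j : Nat, ([a] <+: s.drop j) ↔ s[j]? = some a := by
      intro j; rw [pv_singleton_prefix, List.head?_drop]
    set k := (s.takeWhile (fun c => c ≠ a)).length with hk
    have hka : s[k]? = some a := by
      rw [← List.head?_drop, pv_drop_takeWhile_length]
      rcases hd : s.dropWhile (fun c => c ≠ a) with _ | ⟨d, u⟩
      · exfalso
        have := List.takeWhile_append_dropWhile (p := fun c => c ≠ a) (l := s)
        rw [hd, List.append_nil] at this
        rw [← this] at hm
        have := List.mem_takeWhile_imp hm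
        simp at this
      · have := pv_head_dropWhile (fun c => c ≠ a) s d u hd
        simp at this
        simp [this]
    have hlt : ∀ i < k, s[i]? ≠ some a := by
      intro i hi hcon
      obtain ⟨c, hc, hpc⟩ := pv_takeWhile_getElem? (fun c => c ≠ a) s i hi
      rw [hc] at hcon
      simp at hpc hcon
      exact hpc hcon
    have h1 : ¬ (PySem.Chars.find s [a]).toNat < k := by
      intro hcon
      exact hlt _ hcon ((key _).mp hp)
    have h2 : ¬ k < (PySem.Chars.find s [a]).toNat := by
      intro hcon
      exact hmin k hcon ((key k).mpr hka)
    have : (PySem.Chars.find s [a]).toNat = k := by omega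
    simp [hm]
    omega
  · have : ¬ [a] <:+: s := fun h => hm ((List.singleton_infix_iff a s).mp h)
    simp [hm, (PySem.Chars.find_eq_neg_one_iff s [a]).mpr this]

-- B's per-line computation equals pvLine (wrapped in the singleton/empty chunk shape)
theorem pv_chunk_eq (line : List Char) :
    (if PySem.Chars.find line ['#'] ≠ -1 then
        [PySem.Chars.slice line (some (PySem.Chars.find line ['#'])) none ++ ['\n']]
      else []).flatten = pvLine line := by
  by_cases hm : '#' ∈ line
  · rw [pv_find_singleton, if_pos hm]
    rw [if_pos (show ((line.takeWhile (fun c => c ≠ '#')).length : Int) ≠ -1 by omega)]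
    rw [PySem.Chars.slice_eq_listSlice, PySem.List.slice_from _ (by omega)]
    simp [pvLine, hm, pv_drop_takeWhile_length]
  · simp [pv_find_singleton, hm, pvLine]

theorem pv_chunks_flatten (body : List (List Char) → List Char → List (List Char))
    (hbody : body = fun acc line =>
      if PySem.Chars.find line ['#'] ≠ -1 then
        acc ++ [PySem.Chars.slice line (some (PySem.Chars.find line ['#'])) none ++ ['\n']]
      else acc) :
    ∀ (lines : List (List Char)) (acc : List (List Char)),
      (lines.foldl body acc).flatten = acc.flatten ++ (lines.map pvLine).flatten := by
  intro lines
  induction lines with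
  | nil => simp
  | cons l t ih =>
    intro acc
    rw [List.foldl_cons, ih]
    have hck := pv_chunk_eq l
    have : (body acc l).flatten = acc.flatten ++ pvLine l := by
      simp only [hbody]
      by_cases hcond : PySem.Chars.find l ['#'] ≠ -1
      · rw [if_pos hcond] at hck ⊢
        simp only [List.flatten_cons, List.flatten_nil, List.append_nil] at hck
        rw [PySem.Chars.slice_eq_listSlice] at hck
        simp [hck]
      · rw [if_neg hcond] at hck ⊢
        simp only [List.flatten_nil] at hck
        simp [← hck]
    simp [this]

theorem pv_join_nil (l : List (List Char)) : PySem.Chars.join [] l = l.flatten := by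
  simp only [PySem.Chars.join, List.intercalate]
  induction l with
  | nil => rfl
  | cons x t ih =>
    cases t with
    | nil => simp
    | cons y u => simpa [List.intersperse] using ih

-- second half of splitOn '\n' : what follows the first line
def pvTailSplit (t : List Char) : List (List Char) :=
  if t.dropWhile (· ≠ '\n') = [] then []
  else ((t.dropWhile (· ≠ '\n')).tail).splitOn '\n'

theorem pv_splitOn_eq (t : List Char) :
    t.splitOn '\n' = t.takeWhile (· ≠ '\n') :: pvTailSplit t := by
  induction t with
  | nil => rfl
  | cons c t ih =>
    by_cases h : c = '\n'
    · simp [List.splitOn, List.splitOnP_cons, h, pvTailSplit, List.splitOn]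
    · simp only [List.splitOn] at ih ⊢
      rw [List.splitOnP_cons]
      simp only [beq_iff_eq, h, if_false, ih]
      simp [pvTailSplit, h]

theorem pv_pvLine_cons (c : Char) (h : List Char) (hc : c ≠ '#') :
    pvLine (c :: h) = pvLine h := by
  simp [pvLine, hc, Ne.symm hc]

-- main invariant: A's scan equals the flattened per-line results over splitOn '\n'
theorem pv_main : ∀ (n : Nat) (cs : List Char), cs.length ≤ n →
    findCommentsOuter cs = ((cs.splitOn '\n').map pvLine).flatten := by
  intro n
  induction n with
  | zero =>
    intro cs h
    rw [List.length_eq_zero_iff.mp (Nat.le_zero.mp h)]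
    simp [findCommentsOuter, List.splitOn_nil, pvLine]
  | succ n ih =>
    intro cs hlen
    cases cs with
    | nil => simp [findCommentsOuter, List.splitOn_nil, pvLine]
    | cons c t =>
      by_cases hh : c = '#'
      · subst hh
        rw [findCommentsOuter]
        simp only [pv_inner_spec]
        have hsplit : ('#' :: t).splitOn '\n' = ('#' :: t.takeWhile (· ≠ '\n')) :: pvTailSplit t := by
          simp only [List.splitOn, List.splitOnP_cons]
          simp only [show ('#' == '\n') = false from rfl]
          have := pv_splitOn_eq t
          simp only [List.splitOn] at this
          rw [this]
          simp [pvTailSplit]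
        rw [hsplit]
        have hline : pvLine ('#' :: t.takeWhile (· ≠ '\n')) = '#' :: t.takeWhile (· ≠ '\n') ++ ['\n'] := by
          simp [pvLine]
        rw [List.map_cons, List.flatten_cons, hline]
        have hrest : findCommentsOuter (t.dropWhile (· ≠ '\n')) = ((pvTailSplit t).map pvLine).flatten := by
          rcases hd : t.dropWhile (· ≠ '\n') with _ | ⟨d, u⟩
          · simp only [pvTailSplit, hd]
            simp [findCommentsOuter]
          · have hdn : d = '\n' := by
              have := pv_head_dropWhile (· ≠ '\n') t d u hd
              simpa using this
            have hul : u.length ≤ n := by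
              have h1 : (d :: u).length ≤ t.length := by
                rw [← hd]; exact (List.dropWhile_sublist _).length_le
              simp at h1 hlen
              omega
            simp only [pvTailSplit, hd]
            rw [findCommentsOuter, if_neg (by simp [hdn])]
            simpa using ih u hul
        rw [hrest]
        simp
      · rw [findCommentsOuter, if_neg hh]
        have htl : t.length ≤ n := by simp at hlen; omega
        rw [ih t htl]
        by_cases hn : c = '\n'
        · subst hn
          simp [List.splitOn, List.splitOnP_cons, pvLine]
        · have hsplit : (c :: t).splitOn '\n' = (c :: t.takeWhile (· ≠ '\n')) :: pvTailSplit t := by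
            simp only [List.splitOn, List.splitOnP_cons]
            simp only [beq_iff_eq, hn]
            have := pv_splitOn_eq t
            simp only [List.splitOn] at this
            rw [this]
            simp [pvTailSplit]
          rw [hsplit, pv_splitOn_eq t]
          simp [pv_pvLine_cons c _ hh]

-- ===== VERDICT (by name: the statement is the Claim_ definition above) =====
theorem find_comments_spec : Claim_equal_find_comments := by
  intro s _
  unfold Spec_find_comments find_comments find_comments_alt
  dsimp only
  have hc := pv_chunks_flatten _ rfl (s.toList.splitOn '\n') []
  rw [pv_join_nil, hc, List.flatten_nil, List.nil_append,
    ← pv_main s.toList.length s.toList (Nat.le_refl _)]
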